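-- pv_equiv track=rewrite | github.com/JonathanRhymond/Introduction-to-Computer-Programming-in-Python | 1224_Homework4_Rhymond.py | anti_diag
-- ===== SOURCE A (Python) =====
-- def anti_diag(n):
--     result = []
--     for row in range(n):
--         result.append([0]*n)
--     for i in range(n):
--         result[i][n-1] += 1
--         n -= 1
--     return result
-- ===== SOURCE B (Python) =====
-- def anti_diag(n):
--     return [[0] * (n - 1 - i) + [1] + [0] * i for i in range(n)]
-- ===== Notes on version B (the rewrite author's own statement) =====
-- stated objective: simpler
-- what changed: B builds each row directly as [0]*(n-1-i)+[1]+[0]*i in one comprehension instead of A's two passes (allocate a zero matrix, then mutate diagonal cells while decrementing n).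
import Mathlib
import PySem

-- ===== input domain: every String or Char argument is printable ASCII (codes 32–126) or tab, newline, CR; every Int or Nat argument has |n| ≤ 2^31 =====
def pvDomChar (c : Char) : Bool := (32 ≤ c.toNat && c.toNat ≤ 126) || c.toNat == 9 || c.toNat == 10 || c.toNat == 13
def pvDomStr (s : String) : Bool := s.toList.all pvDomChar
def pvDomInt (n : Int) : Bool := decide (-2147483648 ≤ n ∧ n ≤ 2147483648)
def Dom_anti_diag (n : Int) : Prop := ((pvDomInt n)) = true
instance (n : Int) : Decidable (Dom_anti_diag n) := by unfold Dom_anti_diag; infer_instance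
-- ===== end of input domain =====

-- B builds each anti-diagonal row directly by concatenation in one comprehension,
-- instead of A's two passes (allocate a zero matrix, then mutate one cell per row
-- while decrementing n). Same cost; objective: simpler.

-- ===== PORT A =====
def anti_diag (n : Int) : List (List Int) :=
  -- result = []; for row in range(n): result.append([0]*n)
  let result : List (List Int) :=
    (PySem.List.pyRange 0 n 1).foldl
      (fun result _row => result ++ [List.replicate n.toNat (0 : Int)]) []
  -- for i in range(n): result[i][n-1] += 1; n -= 1   (state: result, mutable n)
  let st :=
    (PySem.List.pyRange 0 n 1).foldl
      (fun (st : List (List Int) × Int) i =>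
        let row := PySem.List.pyGetD st.1 i []
        (PySem.List.pySetD st.1 i
            (PySem.List.pySetD row (st.2 - 1) (PySem.List.pyGetD row (st.2 - 1) 0 + 1)),
         st.2 - 1))
      (result, n)
  st.1

-- ===== PORT B =====
def anti_diag_alt (n : Int) : List (List Int) :=
  (PySem.List.pyRange 0 n 1).map (fun i =>
    List.replicate (n - 1 - i).toNat (0 : Int) ++ [1] ++ List.replicate i.toNat (0 : Int))

-- ===== PRECONDITION & SPEC =====
def Spec_anti_diag (n : Int) (out : List (List Int)) : Prop := out = anti_diag_alt n
instance (n : Int) (out : List (List Int)) : Decidable (Spec_anti_diag n out) := by unfold Spec_anti_diag; infer_instance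

-- ===== CLAIM (what is proved, stated in full; the proofs are below) =====
def Claim_equal_anti_diag : Prop := ∀ (n : Int), Dom_anti_diag n → Spec_anti_diag n (anti_diag n)

-- ===== LEMMAS AND PROOFS =====

-- setting the lone 1 into a zero row
lemma set_replicate_one (m j : Nat) :
    (List.replicate (m + 1 + j) (0 : Int)).set m 1
      = List.replicate m (0 : Int) ++ 1 :: List.replicate j (0 : Int) := by
  induction m with
  | zero => rw [show 1 + j = j + 1 by omega, List.replicate_succ]; simp
  | succ m ih =>
      have : m + 1 + 1 + j = (m + 1 + j) + 1 := by omega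
      rw [this, List.replicate_succ, List.set_cons_succ, ih]
      simp [List.replicate_succ]

-- the invariant of A's second loop, on a k×k zero matrix
lemma loopA_invariant (k : Nat) (j : Nat) (hj : j ≤ k) :
    (PySem.List.pyRange 0 (j : Int) 1).foldl
      (fun (st : List (List Int) × Int) i =>
        let row := PySem.List.pyGetD st.1 i []
        (PySem.List.pySetD st.1 i
            (PySem.List.pySetD row (st.2 - 1) (PySem.List.pyGetD row (st.2 - 1) 0 + 1)),
         st.2 - 1))
      (List.replicate k (List.replicate k (0 : Int)), (k : Int))
    = ((PySem.List.pyRange 0 (j : Int) 1).map (fun i =>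
          List.replicate ((k : Int) - 1 - i).toNat (0 : Int) ++ [1]
            ++ List.replicate i.toNat (0 : Int))
         ++ List.replicate (k - j) (List.replicate k (0 : Int)),
       (k : Int) - j) := by
  induction j with
  | zero => simp
  | succ j ih =>
      have hjk : j < k := by omega
      have hstep : (PySem.List.pyRange 0 ((j+1 : Nat) : Int) 1)
          = (PySem.List.pyRange 0 (j : Int) 1) ++ [(j:Int)] := by
        rw [Nat.cast_add, Nat.cast_one, PySem.List.pyRange_one_succ_right (by positivity)]
      rw [hstep, List.foldl_append, ih (by omega), List.map_append]
      simp only [List.foldl_cons, List.foldl_nil, List.map_cons, List.map_nil]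
      have hrep : k - j = (k - (j+1)) + 1 := by omega
      have hP : ((PySem.List.pyRange 0 (j : Int) 1).map (fun i =>
          List.replicate ((k : Int) - 1 - i).toNat (0 : Int) ++ [1]
            ++ List.replicate i.toNat (0 : Int))).length = j := by
        simp [PySem.List.length_pyRange_one]
      set z : List Int := List.replicate k (0 : Int) with hz
      set P := (PySem.List.pyRange 0 (j : Int) 1).map (fun i =>
          List.replicate ((k : Int) - 1 - i).toNat (0 : Int) ++ [1]
            ++ List.replicate i.toNat (0 : Int)) with hPdef
      rw [hrep, List.replicate_succ]
      -- the accessed row is the zero row z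
      have hget : PySem.List.pyGetD (P ++ z :: List.replicate (k - (j+1)) z) ((j:Int)) ([] : List Int) = z := by
        rw [PySem.List.pyGetD_natCast]
        rw [← hP]
        simp [List.getD]
      -- the inner cell update turns z into the B-row for i = j
      have hidx : (k : Int) - (j:Int) - 1 = ((k - 1 - j : Nat) : Int) := by omega
      have hzsplit : z = List.replicate ((k - 1 - j) + 1 + j) (0 : Int) := by
        rw [hz]; congr 1; omega
      have hcell : PySem.List.pyGetD z ((k : Int) - (j:Int) - 1) (0 : Int) = 0 := by
        have hlt : k - 1 - j < k := by omega
        rw [hidx, PySem.List.pyGetD_natCast, hz]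
        simp [List.getD, hlt]
      have hrow : PySem.List.pySetD z ((k : Int) - (j:Int) - 1)
            (PySem.List.pyGetD z ((k : Int) - (j:Int) - 1) (0 : Int) + 1)
          = List.replicate ((k : Int) - 1 - (j:Int)).toNat (0 : Int) ++ [1]
            ++ List.replicate ((j:Int)).toNat (0 : Int) := by
        rw [hcell, hidx, PySem.List.pySetD_natCast, zero_add]
        rw [hzsplit, set_replicate_one]
        have h1 : ((k : Int) - 1 - (j:Int)).toNat = k - 1 - j := by omega
        have h2 : ((j:Int)).toNat = j := by omega
        rw [h1, h2]
        simp
      rw [show ((k:Int) - (j:Int) - (1:Int)) = ((k:Int) - (j:Int)) - 1 from rfl] at hrow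
      refine Prod.ext ?_ ?_
      · show PySem.List.pySetD _ _ _ = _
        rw [hget, hrow, PySem.List.pySetD_natCast]
        rw [List.set_append_right _ _ (by omega)]
        rw [hP]
        simp
      · show (k:Int) - (j:Int) - 1 = (k:Int) - ((j:Nat)+1 : Nat)
        push_cast
        ring

-- ===== VERDICT (by name: the statement is the Claim_ definition above) =====
theorem anti_diag_spec : Claim_equal_anti_diag := by
  intro n _
  unfold Spec_anti_diag anti_diag anti_diag_alt
  by_cases hn : n ≤ 0
  · rw [PySem.List.pyRange_one_eq_nil hn]
    simp
  · have hn' : 0 < n := lt_of_not_ge hn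
    have hk : n = ((n.toNat : Nat) : Int) := by omega
    have hfirst : (PySem.List.pyRange 0 n 1).foldl
        (fun result _row => result ++ [List.replicate n.toNat (0 : Int)]) []
        = List.replicate n.toNat (List.replicate n.toNat (0 : Int)) := by
      rw [PySem.List.foldl_append_singleton_eq_map]
      simp [List.map_const', PySem.List.length_pyRange_one]
    simp only [hfirst]
    rw [hk]
    simp only [Int.toNat_natCast]
    have := loopA_invariant n.toNat n.toNat (le_refl _)
    simp only [Nat.sub_self, List.replicate_zero, List.append_nil] at this
    rw [this]
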